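-- pv_equiv track=rewrite | github.com/computationalgeography/pycatch | pcrasterModules/generalfunctions.py | removePeriodsFromAListOfTimesteps
-- ===== SOURCE A (Python) =====
-- def removePeriodsFromAListOfTimesteps(filterTimesteps, periodsToExclude):
--   newFilterTimesteps = filterTimesteps[:]
--   for period in periodsToExclude:
--     lower = period[0]
--     upper = period[1]
--     oldFilterTimesteps = newFilterTimesteps[:]
--     newFilterTimesteps = []
--     for timestep in oldFilterTimesteps:
--       if (timestep < lower) or (timestep > upper):
--         newFilterTimesteps.append(timestep)
--   return newFilterTimesteps
-- ===== SOURCE B (Python) =====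
-- def removePeriodsFromAListOfTimesteps(filterTimesteps, periodsToExclude):
--   intervals = sorted(((period[0], period[1]) for period in periodsToExclude), key=lambda iv: iv[0])
--   merged = []
--   for lo, hi in intervals:
--     if merged and lo <= merged[-1][1]:
--       if hi > merged[-1][1]:
--         merged[-1] = (merged[-1][0], hi)
--     else:
--       merged.append((lo, hi))
--   result = []
--   for timestep in filterTimesteps:
--     # binary search: i = number of merged intervals whose start is <= timestep
--     lo_i, hi_i = 0, len(merged)
--     while lo_i < hi_i:
--       mid = (lo_i + hi_i) // 2
--       if merged[mid][0] <= timestep: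
--         lo_i = mid + 1
--       else:
--         hi_i = mid
--     if lo_i == 0 or timestep > merged[lo_i - 1][1]:
--       result.append(timestep)
--   return result
-- ===== Notes on version B (the rewrite author's own statement) =====
-- stated objective: faster
-- what changed: A refilters the whole surviving timestep list once per period (O(P*T)); B sorts the periods once, merges them into disjoint intervals, and decides each timestep with one binary search over the merged intervals (O((T+P) log P)).
import Mathlib
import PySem

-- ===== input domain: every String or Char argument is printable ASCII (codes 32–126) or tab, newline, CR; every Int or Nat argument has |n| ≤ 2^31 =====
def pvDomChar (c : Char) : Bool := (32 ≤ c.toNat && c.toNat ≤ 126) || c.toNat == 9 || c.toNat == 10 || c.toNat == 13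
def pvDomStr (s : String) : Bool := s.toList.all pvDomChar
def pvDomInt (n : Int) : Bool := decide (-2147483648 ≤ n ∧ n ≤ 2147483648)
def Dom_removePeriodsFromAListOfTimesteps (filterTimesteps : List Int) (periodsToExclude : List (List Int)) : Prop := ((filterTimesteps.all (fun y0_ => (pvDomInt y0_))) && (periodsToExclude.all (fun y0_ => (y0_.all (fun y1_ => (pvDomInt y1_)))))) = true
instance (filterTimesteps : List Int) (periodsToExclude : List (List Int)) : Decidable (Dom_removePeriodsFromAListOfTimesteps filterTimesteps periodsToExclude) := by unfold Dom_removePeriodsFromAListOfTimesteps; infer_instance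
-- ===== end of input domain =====

-- B replaces A's pass-per-period refiltering by sort+merge of the periods and one binary search
-- per timestep (objective: faster on many periods); same return value on all inputs in Pre_.

-- ===== PORT A =====
-- literal port of A: one filtering pass over the (surviving) timesteps per period,
-- rebuilding the list by appending; period[0] / period[1] via pyGet? (IndexError → Pre_)
def removePeriodsFromAListOfTimesteps (filterTimesteps : List Int) (periodsToExclude : List (List Int)) : List Int :=
  periodsToExclude.foldl
    (fun newFilterTimesteps period =>
      let lower := (PySem.List.pyGet? period 0).getD 0
      let upper := (PySem.List.pyGet? period 1).getD 0
      newFilterTimesteps.foldl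
        (fun acc timestep =>
          if timestep < lower ∨ timestep > upper then acc ++ [timestep] else acc)
        [])
    filterTimesteps

-- ===== PORT B =====
-- Source B's merge loop; Python appends at the end and updates merged[-1], the port keeps the
-- accumulator reversed (head = Python's merged[-1]) and reverses once at the end: same list.
def pvMergeStep (merged : List (Int × Int)) (iv : Int × Int) : List (Int × Int) :=
  match merged with
  | [] => [iv]
  | last :: rest =>
    if iv.1 ≤ last.2 then
      if iv.2 > last.2 then (last.1, iv.2) :: rest else last :: rest
    else iv :: last :: rest

-- Source B's hand-written while-loop binary search, ported as the same loop (state lo, hi)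
def pvBisect (merged : List (Int × Int)) (t : Int) (lo hi : Nat) : Nat :=
  if lo < hi then
    let mid := (lo + hi) / 2
    if (merged.getD mid (0, 0)).1 ≤ t then pvBisect merged t (mid + 1) hi
    else pvBisect merged t lo mid
  else lo
termination_by hi - lo
decreasing_by all_goals omega

def removePeriodsFromAListOfTimesteps_alt (filterTimesteps : List Int) (periodsToExclude : List (List Int)) : List Int :=
  let intervals := PySem.List.sorted
    (periodsToExclude.map (fun period =>
      ((PySem.List.pyGet? period 0).getD 0, (PySem.List.pyGet? period 1).getD 0)))
    (fun iv => iv.1) false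
  let merged := (intervals.foldl pvMergeStep []).reverse
  filterTimesteps.foldl
    (fun result timestep =>
      let i := pvBisect merged timestep 0 merged.length
      if i = 0 ∨ timestep > (merged.getD (i - 1) (0, 0)).2 then result ++ [timestep] else result)
    []

-- ===== PRECONDITION & SPEC =====
-- Pre_ excludes exactly the inputs where Python A raises IndexError: a period with fewer than
-- two entries (period[0] / period[1]); Source B raises there too.
def Pre_removePeriodsFromAListOfTimesteps (_filterTimesteps : List Int) (periodsToExclude : List (List Int)) : Prop :=
  ∀ p ∈ periodsToExclude, 2 ≤ p.length
instance (filterTimesteps : List Int) (periodsToExclude : List (List Int)) : Decidable (Pre_removePeriodsFromAListOfTimesteps filterTimesteps periodsToExclude) := by unfold Pre_removePeriodsFromAListOfTimesteps; infer_instance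
def pvWitness_removePeriodsFromAListOfTimesteps : List Int × List (List Int) := ([1, 5, 10], [[2, 6]])

def Spec_removePeriodsFromAListOfTimesteps (filterTimesteps : List Int) (periodsToExclude : List (List Int)) (out : List Int) : Prop := out = removePeriodsFromAListOfTimesteps_alt filterTimesteps periodsToExclude
instance (filterTimesteps : List Int) (periodsToExclude : List (List Int)) (out : List Int) : Decidable (Spec_removePeriodsFromAListOfTimesteps filterTimesteps periodsToExclude out) := by unfold Spec_removePeriodsFromAListOfTimesteps; infer_instance

-- ===== CLAIM (what is proved, stated in full; the proofs are below) =====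
def Claim_equal_removePeriodsFromAListOfTimesteps : Prop := ∀ (filterTimesteps : List Int) (periodsToExclude : List (List Int)), Dom_removePeriodsFromAListOfTimesteps filterTimesteps periodsToExclude → Pre_removePeriodsFromAListOfTimesteps filterTimesteps periodsToExclude → Spec_removePeriodsFromAListOfTimesteps filterTimesteps periodsToExclude (removePeriodsFromAListOfTimesteps filterTimesteps periodsToExclude)

-- ===== LEMMAS AND PROOFS =====

-- the (lower, upper) pair a period contributes
def pvIv (p : List Int) : Int × Int :=
  ((PySem.List.pyGet? p 0).getD 0, (PySem.List.pyGet? p 1).getD 0)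

-- "t is covered by some interval of ivs"
def covB (ivs : List (Int × Int)) (t : Int) : Bool :=
  ivs.any (fun iv => decide (iv.1 ≤ t ∧ t ≤ iv.2))

-- separation relation on the REVERSED merged accumulator (head = most recent interval)
def pvRevSep (a b : Int × Int) : Prop := b.1 ≤ a.1 ∧ b.2 < a.1

theorem covB_nil (t : Int) : covB [] t = false := rfl

theorem covB_cons (iv : Int × Int) (ivs : List (Int × Int)) (t : Int) :
    covB (iv :: ivs) t = (decide (iv.1 ≤ t ∧ t ≤ iv.2) || covB ivs t) := by
  simp [covB]

-- A's result is the filter by "outside every period"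
theorem portA_eq_filter (ps : List (List Int)) : ∀ ts : List Int,
    removePeriodsFromAListOfTimesteps ts ps = ts.filter (fun t => !covB (ps.map pvIv) t) := by
  induction ps with
  | nil => intro ts; simp [removePeriodsFromAListOfTimesteps, covB]
  | cons p ps ih =>
    intro ts
    have hstep : ts.foldl
        (fun acc timestep =>
          if timestep < (PySem.List.pyGet? p 0).getD 0 ∨ timestep > (PySem.List.pyGet? p 1).getD 0
          then acc ++ [timestep] else acc) []
        = ts.filter (fun t =>
            decide (t < (PySem.List.pyGet? p 0).getD 0 ∨ t > (PySem.List.pyGet? p 1).getD 0)) := by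
      have := PySem.List.foldl_append_if
        (fun t : Int => decide (t < (PySem.List.pyGet? p 0).getD 0 ∨ t > (PySem.List.pyGet? p 1).getD 0))
        id ts []
      simpa using this
    have hA : removePeriodsFromAListOfTimesteps ts (p :: ps)
        = removePeriodsFromAListOfTimesteps
            (ts.filter (fun t =>
              decide (t < (PySem.List.pyGet? p 0).getD 0 ∨ t > (PySem.List.pyGet? p 1).getD 0))) ps := by
      simp only [removePeriodsFromAListOfTimesteps, List.foldl_cons]
      rw [hstep]
    rw [hA, ih, List.filter_filter]
    apply List.filter_congr
    intro t _
    rw [List.map_cons, covB_cons]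
    simp only [pvIv, Bool.not_or]
    cases hc : covB (ps.map pvIv) t
    · simp only [Bool.not_false, Bool.and_true, Bool.true_and]
      rw [← decide_not, decide_eq_decide]
      omega
    · simp

-- B's result is the filter by the bisect test
theorem portB_eq_filter (ts : List Int) (ps : List (List Int)) :
    removePeriodsFromAListOfTimesteps_alt ts ps
      = ts.filter (fun t =>
          let M := ((PySem.List.sorted (ps.map pvIv) (fun iv => iv.1) false).foldl pvMergeStep []).reverse
          let i := pvBisect M t 0 M.length
          decide (i = 0 ∨ t > (M.getD (i - 1) (0, 0)).2)) := by
  have := PySem.List.foldl_append_if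
    (fun t : Int =>
      let M := ((PySem.List.sorted (ps.map pvIv) (fun iv => iv.1) false).foldl pvMergeStep []).reverse
      let i := pvBisect M t 0 M.length
      decide (i = 0 ∨ t > (M.getD (i - 1) (0, 0)).2))
    id ts []
  simp only [removePeriodsFromAListOfTimesteps_alt]
  simpa using this

-- one pvMergeStep: keeps the separation invariant, keeps the head's start ≤ iv.1, covers iv ∪ old
theorem pvMergeStep_inv (acc : List (Int × Int)) (iv : Int × Int)
    (hacc : acc.Pairwise pvRevSep)
    (hhead : ∀ a, acc.head? = some a → a.1 ≤ iv.1) :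
    (pvMergeStep acc iv).Pairwise pvRevSep ∧
    (∀ a, (pvMergeStep acc iv).head? = some a → a.1 ≤ iv.1) ∧
    (∀ t, covB (pvMergeStep acc iv) t = (decide (iv.1 ≤ t ∧ t ≤ iv.2) || covB acc t)) := by
  match acc with
  | [] =>
    refine ⟨by simp [pvMergeStep], ?_, ?_⟩
    · intro a ha; simp [pvMergeStep] at ha; simp [ha]
    · intro t; simp [pvMergeStep, covB_cons, covB_nil]
  | last :: rest =>
    have hl : last.1 ≤ iv.1 := hhead last rfl
    rcases List.pairwise_cons.mp hacc with ⟨hrel, hrest⟩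
    by_cases h1 : iv.1 ≤ last.2
    · by_cases h2 : iv.2 > last.2
      · -- extend the last interval
        have hme : pvMergeStep (last :: rest) iv = (last.1, iv.2) :: rest := by
          simp [pvMergeStep, h1, h2]
        refine ⟨?_, ?_, ?_⟩
        · rw [hme]; exact List.pairwise_cons.mpr ⟨fun b hb => hrel b hb, hrest⟩
        · intro a ha; rw [hme] at ha; simp at ha; rw [← ha]; exact hl
        · intro t
          rw [hme, covB_cons, covB_cons]
          cases hc : covB rest t
          · simp only [Bool.or_false, ← Bool.decide_or, decide_eq_decide]
            omega
          · simp
      · -- iv inside the last interval: no change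
        have hme : pvMergeStep (last :: rest) iv = last :: rest := by
          simp [pvMergeStep, h1, h2]
        refine ⟨by rw [hme]; exact hacc, ?_, ?_⟩
        · intro a ha; rw [hme] at ha; simp at ha; rw [← ha]; exact hl
        · intro t
          rw [hme, covB_cons]
          cases hc : covB rest t
          · simp only [Bool.or_false, ← Bool.decide_or, decide_eq_decide]
            omega
          · simp
    · -- gap: append iv
      have hme : pvMergeStep (last :: rest) iv = iv :: last :: rest := by
        simp [pvMergeStep, h1]
      refine ⟨?_, ?_, ?_⟩
      · rw [hme]
        refine List.pairwise_cons.mpr ⟨?_, hacc⟩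
        intro b hb
        rcases List.mem_cons.mp hb with hb | hb
        · subst hb; exact ⟨hl, by omega⟩
        · rcases hrel b hb with ⟨hb1, hb2⟩; exact ⟨le_trans hb1 hl, by omega⟩
      · intro a ha; rw [hme] at ha; simp at ha; rw [← ha]
      · intro t; rw [hme, covB_cons]

-- folding pvMergeStep over start-sorted intervals: separated result with the same coverage
theorem pvMerge_fold_inv (ivs : List (Int × Int)) : ∀ acc : List (Int × Int),
    ivs.Pairwise (fun a b => a.1 ≤ b.1) →
    acc.Pairwise pvRevSep →
    (∀ a, acc.head? = some a → ∀ iv ∈ ivs, a.1 ≤ iv.1) →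
    (ivs.foldl pvMergeStep acc).Pairwise pvRevSep ∧
    (∀ t, covB (ivs.foldl pvMergeStep acc) t = (covB ivs t || covB acc t)) := by
  induction ivs with
  | nil => intro acc _ hacc _; exact ⟨hacc, fun t => by simp [covB_nil]⟩
  | cons iv ivs ih =>
    intro acc hsort hacc hhead
    rcases List.pairwise_cons.mp hsort with ⟨hfirst, hsort'⟩
    obtain ⟨hP, hH, hC⟩ := pvMergeStep_inv acc iv hacc (fun a ha => hhead a ha iv (List.mem_cons_self))
    obtain ⟨hP', hC'⟩ := ih (pvMergeStep acc iv) hsort' hP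
      (fun a ha iv' hiv' => le_trans (hH a ha) (hfirst iv' hiv'))
    refine ⟨by simpa using hP', fun t => ?_⟩
    have := hC' t
    simp only [List.foldl_cons]
    rw [this, hC t, covB_cons]
    cases covB ivs t <;> cases decide (iv.1 ≤ t ∧ t ≤ iv.2) <;> cases covB acc t <;> rfl

-- the binary search splits the (start-sorted) list at the number of starts ≤ t
theorem pvBisect_spec (M : List (Int × Int)) (t : Int)
    (hsort : ∀ i j : Nat, i ≤ j → j < M.length → (M.getD i (0, 0)).1 ≤ (M.getD j (0, 0)).1) :
    ∀ fuel lo hi : Nat, hi - lo ≤ fuel → lo ≤ hi → hi ≤ M.length →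
    (∀ j, j < lo → (M.getD j (0, 0)).1 ≤ t) →
    (∀ j, hi ≤ j → j < M.length → t < (M.getD j (0, 0)).1) →
    lo ≤ pvBisect M t lo hi ∧ pvBisect M t lo hi ≤ hi ∧
    (∀ j, j < pvBisect M t lo hi → (M.getD j (0, 0)).1 ≤ t) ∧
    (∀ j, pvBisect M t lo hi ≤ j → j < M.length → t < (M.getD j (0, 0)).1) := by
  intro fuel
  induction fuel with
  | zero =>
    intro lo hi hfuel hlohi hhi hlow hhigh
    have : lo = hi := by omega
    subst this
    rw [pvBisect]
    simp only [lt_irrefl, if_false]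
    exact ⟨le_refl _, le_refl _, hlow, hhigh⟩
  | succ fuel ih =>
    intro lo hi hfuel hlohi hhi hlow hhigh
    rw [pvBisect]
    by_cases hlt : lo < hi
    · simp only [hlt, if_true]
      set mid := (lo + hi) / 2 with hmid
      have hmlt : mid < hi := by omega
      have hmge : lo ≤ mid := by omega
      by_cases hc : (M.getD mid (0, 0)).1 ≤ t
      · simp only [hc, if_true]
        have := ih (mid + 1) hi (by omega) (by omega) hhi
          (fun j hj => by
            rcases Nat.lt_succ_iff_lt_or_eq.mp hj with hj | hj
            · rcases Nat.lt_or_ge j lo with h | h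
              · exact hlow j h
              · exact le_trans (hsort j mid (by omega) (by omega)) hc
            · subst hj; exact hc)
          hhigh
        exact ⟨by omega, this.2.1, this.2.2.1, this.2.2.2⟩
      · simp only [hc, if_false]
        have := ih lo mid (by omega) (by omega) (by omega) hlow
          (fun j hj hjl => by
            have : (M.getD mid (0, 0)).1 ≤ (M.getD j (0, 0)).1 := hsort mid j hj hjl
            omega)
        exact ⟨this.1, by omega, this.2.2.1, this.2.2.2⟩
    · simp only [hlt, if_false]
      have : lo = hi := by omega
      subst this
      exact ⟨le_refl _, le_refl _, hlow, hhigh⟩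

-- with a separated, start-sorted merged list the bisect test means "not covered"
theorem bisect_test_eq_not_covB (M : List (Int × Int))
    (hp : M.Pairwise (fun a b : Int × Int => a.1 ≤ b.1 ∧ a.2 < b.1)) (t : Int) :
    (let i := pvBisect M t 0 M.length
     decide (i = 0 ∨ t > (M.getD (i - 1) (0, 0)).2)) = !covB M t := by
  have hget : ∀ (j : Nat) (hj : j < M.length), M.getD j (0, 0) = M[j] := by
    intro j hj; exact List.getD_eq_getElem M (0, 0) hj
  have hpg := List.pairwise_iff_getElem.mp hp
  have hsort : ∀ i j : Nat, i ≤ j → j < M.length → (M.getD i (0, 0)).1 ≤ (M.getD j (0, 0)).1 := by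
    intro i j hij hj
    rcases Nat.lt_or_ge i j with h | h
    · rw [hget i (by omega), hget j hj]
      exact (hpg i j (by omega) hj h).1
    · have : i = j := by omega
      subst this; exact le_refl _
  obtain ⟨-, hle, hlow, hhigh⟩ := pvBisect_spec M t hsort M.length 0 M.length
    (by omega) (by omega) (le_refl _) (by omega) (fun j hj hjl => by omega)
  set i := pvBisect M t 0 M.length with hidef
  have hcov : covB M t = true ↔ ∃ j : Nat, ∃ h : j < M.length, M[j].1 ≤ t ∧ t ≤ M[j].2 := by
    simp only [covB, List.any_eq_true, decide_eq_true_eq]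
    constructor
    · rintro ⟨iv, hm, h⟩
      rcases List.mem_iff_getElem.mp hm with ⟨j, hj, rfl⟩
      exact ⟨j, hj, h⟩
    · rintro ⟨j, hj, h⟩
      exact ⟨M[j]'hj, List.getElem_mem hj, h⟩
  by_cases hi : i = 0
  · have hnone : covB M t = false := by
      rw [← Bool.not_eq_true, hcov]
      rintro ⟨j, hj, h1, -⟩
      have := hhigh j (by omega) hj
      rw [hget j hj] at this; omega
    simp [hi, hnone]
  · have hi1 : i - 1 < M.length := by omega
    by_cases hcase : t ≤ (M.getD (i - 1) (0, 0)).2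
    · have : covB M t = true := by
        rw [hcov]
        refine ⟨i - 1, hi1, ?_, ?_⟩
        · rw [← hget _ hi1]; exact hlow (i - 1) (by omega)
        · rw [← hget _ hi1]; exact hcase
      simp only [this, Bool.not_true, decide_eq_false_iff_not, not_or]
      exact ⟨hi, by omega⟩
    · have hnone : covB M t = false := by
        rw [← Bool.not_eq_true, hcov]
        rintro ⟨j, hj, h1, h2⟩
        rcases Nat.lt_or_ge j i with hji | hji
        · rcases Nat.lt_or_ge j (i - 1) with hji' | hji'
          · -- j strictly before the candidate: its end is below the candidate's start ≤ t
            have hgap : M[j].2 < M[i - 1].1 := (hpg j (i - 1) (by omega) hi1 hji').2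
            have hst : (M.getD (i - 1) (0, 0)).1 ≤ t := hlow (i - 1) (by omega)
            rw [hget _ hi1] at hst
            omega
          · have hj' : j = i - 1 := by omega
            subst hj'
            rw [hget _ hi1] at hcase
            omega
        · have := hhigh j hji hj
          rw [hget j hj] at this; omega
      simp only [hnone, Bool.not_false, decide_eq_true_eq]
      right; omega

-- merged list of B, from the original period list
theorem merged_props (ps : List (List Int)) :
    (((PySem.List.sorted (ps.map pvIv) (fun iv => iv.1) false).foldl pvMergeStep []).reverse).Pairwise
      (fun a b : Int × Int => a.1 ≤ b.1 ∧ a.2 < b.1) ∧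
    (∀ t, covB (((PySem.List.sorted (ps.map pvIv) (fun iv => iv.1) false).foldl pvMergeStep []).reverse) t
        = covB (ps.map pvIv) t) := by
  obtain ⟨hP, hC⟩ := pvMerge_fold_inv (PySem.List.sorted (ps.map pvIv) (fun iv => iv.1) false) []
    (PySem.List.sorted_pairwise _ _) (List.Pairwise.nil) (by intro a ha; simp at ha)
  constructor
  · rw [List.pairwise_reverse]
    exact hP.imp (fun h => ⟨h.1, h.2⟩)
  · intro t
    have hrev : covB ((((PySem.List.sorted (ps.map pvIv) (fun iv => iv.1) false)).foldl pvMergeStep []).reverse) t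
        = covB (((PySem.List.sorted (ps.map pvIv) (fun iv => iv.1) false)).foldl pvMergeStep []) t := by
      simp [covB]
    rw [hrev, hC t, covB_nil, Bool.or_false]
    exact (PySem.List.sorted_perm (ps.map pvIv) (fun iv => iv.1) false).any_eq

-- ===== VERDICT (by name: the statement is the Claim_ definition above) =====
theorem removePeriodsFromAListOfTimesteps_spec : Claim_equal_removePeriodsFromAListOfTimesteps := by
  intro ts ps _ _
  unfold Spec_removePeriodsFromAListOfTimesteps
  rw [portA_eq_filter, portB_eq_filter]
  apply List.filter_congr
  intro t _
  obtain ⟨hP, hC⟩ := merged_props ps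
  rw [← hC t]
  exact (bisect_test_eq_not_covB _ hP t).symm
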